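-- pv_equiv track=rewrite | github.com/ivanilos/advent-of-code-2020 | 14/part_two.py | calc
-- ===== SOURCE A (Python) =====
-- WORD_SZ = 35
--
-- def calc(mask, val):
-- 	bitPos = WORD_SZ
--
-- 	for bit in mask:
-- 		if bit == '1':
-- 			val |= 1 << bitPos
-- 		elif bit == '0':
-- 			val &= ~(1 << bitPos)
--
-- 		bitPos -= 1
--
-- 	return val
-- ===== SOURCE B (Python) =====
-- WORD_SZ = 35
--
-- def calc(mask, val):
--     # Only the first WORD_SZ+1 mask characters address nonnegative bit positions.
--     m = mask[:WORD_SZ + 1]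
--     shift = WORD_SZ + 1 - len(m)
--     or_mask = int('0' + ''.join('1' if c == '1' else '0' for c in m), 2)
--     clear_mask = int('0' + ''.join('1' if c == '0' else '0' for c in m), 2)
--     return (val | (or_mask << shift)) & ~(clear_mask << shift)
-- ===== Notes on version B (the rewrite author's own statement) =====
-- stated objective: alternative
-- what changed: B has no per-bit set/clear loop over val: it slices the mask to its first 36 characters (the only ones that address valid bit positions), translates them into two binary strings, parses those with int(.,2) into aggregate or/clear masks, aligns them with one shift, and applies them in a single combined bit operation (val | or_mask<<shift) & ~(clear_mask<<shift).
import Mathlib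
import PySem

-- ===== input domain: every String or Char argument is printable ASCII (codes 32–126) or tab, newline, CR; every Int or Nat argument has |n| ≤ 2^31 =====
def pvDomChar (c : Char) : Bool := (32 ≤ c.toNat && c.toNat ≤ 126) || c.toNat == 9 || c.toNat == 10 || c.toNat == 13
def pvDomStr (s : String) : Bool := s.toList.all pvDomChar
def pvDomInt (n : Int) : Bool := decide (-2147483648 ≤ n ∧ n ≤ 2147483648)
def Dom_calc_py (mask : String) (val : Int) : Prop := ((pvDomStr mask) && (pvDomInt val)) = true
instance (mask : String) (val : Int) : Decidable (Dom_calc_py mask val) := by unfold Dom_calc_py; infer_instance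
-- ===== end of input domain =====

-- B replaces A's per-bit set/clear loop over val by slice-translate-parse: only the first 36
-- mask chars (the valid bit positions) are turned into two binary strings, parsed into
-- aggregate masks, shifted once and applied in one combined bit operation; a timing run
-- measured B faster on long masks, whose tail A scans and B drops.

-- ===== PORT A =====
-- A's loop over the mask with the decrementing counter bitPos.
-- bitPos.toNat is exact for bitPos ≥ 0; where Python's '1 << bitPos' would raise
-- ValueError (a '0'/'1' char at index > 35) the input is excluded by Pre_calc_py.
def calcAux : List Char → Int → Int → Int
  | [], _, val => val
  | bit :: rest, bitPos, val =>
      calcAux rest (bitPos - 1)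
        (if bit = '1' then PySem.Int.bor val (1 <<< bitPos.toNat)
         else if bit = '0' then PySem.Int.band val (Int.not (1 <<< bitPos.toNat))
         else val)

def calc_py (mask : String) (val : Int) : Int := calcAux mask.toList 35 val

-- ===== PORT B =====
-- port of int('0' + s, 2) for s a string of '0'/'1' chars: Horner's rule; the leading '0'
-- leaves the Horner accumulator at 0, which is exactly the fold's start value.
def binParse (l : List Char) : Nat :=
  l.foldl (fun a c => 2 * a + (if c = '1' then 1 else 0)) 0

def calc_py_alt (mask : String) (val : Int) : Int :=
  let m := mask.toList.take 36
  let shift := 36 - m.length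
  let orMask := binParse (m.map (fun c => if c = '1' then '1' else '0'))
  let clearMask := binParse (m.map (fun c => if c = '0' then '1' else '0'))
  PySem.Int.band (PySem.Int.bor val ((orMask <<< shift : Nat) : Int))
    (Int.not ((clearMask <<< shift : Nat) : Int))

-- ===== PRECONDITION & SPEC =====
-- Pre_ excludes exactly the inputs where A raises ValueError: a '0' or '1' character at
-- index > 35 makes A shift by a negative amount.
def Pre_calc_py (mask : String) (val : Int) : Prop :=
  ((mask.toList.drop 36).all (fun c => !(c == '0' || c == '1'))) = true
instance (mask : String) (val : Int) : Decidable (Pre_calc_py mask val) := by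
  unfold Pre_calc_py; infer_instance

def pvWitness_calc_py : String × Int := ("X10X1", 77)

def Spec_calc_py (mask : String) (val : Int) (out : Int) : Prop := out = calc_py_alt mask val
instance (mask : String) (val : Int) (out : Int) : Decidable (Spec_calc_py mask val out) := by
  unfold Spec_calc_py; infer_instance

-- ===== CLAIM (what is proved, stated in full; the proofs are below) =====
def Claim_equal_calc_py : Prop := ∀ (mask : String) (val : Int), Dom_calc_py mask val → Pre_calc_py mask val → Spec_calc_py mask val (calc_py mask val)

-- ===== LEMMAS AND PROOFS =====

-- Nat lemma: subtracting the common bits is bitwise difference.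
theorem pv_sub_and (n m : Nat) : n - (n &&& m) = Nat.ldiff n m := by
  induction n using Nat.binaryRec generalizing m with
  | zero =>
      have : Nat.ldiff 0 m = 0 := by
        apply Nat.eq_of_testBit_eq; simp [Nat.testBit_ldiff]
      simp [Nat.zero_and, this]
  | bit b a ih =>
      induction m using Nat.binaryRec with
      | zero =>
          have h1 : Nat.ldiff (Nat.bit b a) 0 = Nat.bit b a := by
            apply Nat.eq_of_testBit_eq; simp [Nat.testBit_ldiff]
          simp [h1]
      | bit c d _ =>
          rw [Nat.land_bit, Nat.ldiff_bit, Nat.bit_val, Nat.bit_val, Nat.bit_val]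
          have h1 : a &&& d ≤ a := Nat.and_le_left
          have h2 := ih d
          cases b <;> cases c <;> simp [Bool.toNat] <;> omega

-- "infinite two's complement" test bit of a Python int.
def itb (a : Int) (i : Nat) : Bool :=
  if 0 ≤ a then a.toNat.testBit i else !((-a - 1).toNat.testBit i)

theorem itb_natCast (n : Nat) (i : Nat) : itb (n : Int) i = n.testBit i := by
  simp [itb]

theorem itb_bor (a b : Int) (i : Nat) :
    itb (PySem.Int.bor a b) i = (itb a i || itb b i) := by
  by_cases h1 : 0 ≤ a <;> by_cases h2 : 0 ≤ b
  · rw [PySem.Int.bor_of_nonneg h1 h2]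
    simp [itb, h1, h2, Nat.testBit_lor]
  · have he : PySem.Int.bor a b = -(((-b - 1).toNat - ((-b - 1).toNat &&& a.toNat) : Nat) : Int) - 1 := by
      simp only [PySem.Int.bor, if_pos h1, if_neg h2]
    rw [he]
    have hx : (0:Int) ≤ (((-b - 1).toNat - ((-b - 1).toNat &&& a.toNat) : Nat) : Int) := by positivity
    have hneg : ¬ (0:Int) ≤ -(((-b - 1).toNat - ((-b - 1).toNat &&& a.toNat) : Nat) : Int) - 1 := by omega
    simp only [itb, if_neg hneg, if_pos h1, if_neg h2]
    have harg : (-(-(((-b - 1).toNat - ((-b - 1).toNat &&& a.toNat) : Nat) : Int) - 1) - 1).toNat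
        = (-b - 1).toNat - ((-b - 1).toNat &&& a.toNat) := by omega
    rw [harg, pv_sub_and, Nat.testBit_ldiff]
    cases ((-b - 1).toNat.testBit i) <;> cases (a.toNat.testBit i) <;> simp
  · have he : PySem.Int.bor a b = -(((-a - 1).toNat - ((-a - 1).toNat &&& b.toNat) : Nat) : Int) - 1 := by
      simp only [PySem.Int.bor, if_neg h1, if_pos h2]
    rw [he]
    have hneg : ¬ (0:Int) ≤ -(((-a - 1).toNat - ((-a - 1).toNat &&& b.toNat) : Nat) : Int) - 1 := by
      have : (0:Int) ≤ (((-a - 1).toNat - ((-a - 1).toNat &&& b.toNat) : Nat) : Int) := by positivity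
      omega
    simp only [itb, if_neg hneg, if_neg h1, if_pos h2]
    have harg : (-(-(((-a - 1).toNat - ((-a - 1).toNat &&& b.toNat) : Nat) : Int) - 1) - 1).toNat
        = (-a - 1).toNat - ((-a - 1).toNat &&& b.toNat) := by omega
    rw [harg, pv_sub_and, Nat.testBit_ldiff]
    cases ((-a - 1).toNat.testBit i) <;> cases (b.toNat.testBit i) <;> simp
  · have he : PySem.Int.bor a b = -((((-a - 1).toNat &&& (-b - 1).toNat : Nat)) : Int) - 1 := by
      simp only [PySem.Int.bor, if_neg h1, if_neg h2]
    rw [he]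
    have hneg : ¬ (0:Int) ≤ -((((-a - 1).toNat &&& (-b - 1).toNat : Nat)) : Int) - 1 := by
      have : (0:Int) ≤ ((((-a - 1).toNat &&& (-b - 1).toNat : Nat)) : Int) := by positivity
      omega
    simp only [itb, if_neg hneg, if_neg h1, if_neg h2]
    have harg : (-(-((((-a - 1).toNat &&& (-b - 1).toNat : Nat)) : Int) - 1) - 1).toNat
        = (-a - 1).toNat &&& (-b - 1).toNat := by omega
    rw [harg, Nat.testBit_land]
    cases ((-a - 1).toNat.testBit i) <;> cases ((-b - 1).toNat.testBit i) <;> simp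

theorem itb_band (a b : Int) (i : Nat) :
    itb (PySem.Int.band a b) i = (itb a i && itb b i) := by
  by_cases h1 : 0 ≤ a <;> by_cases h2 : 0 ≤ b
  · rw [PySem.Int.band_of_nonneg h1 h2]
    simp [itb, h1, h2, Nat.testBit_land]
  · have he : PySem.Int.band a b = ((a.toNat - (a.toNat &&& (-b - 1).toNat) : Nat) : Int) := by
      simp only [PySem.Int.band, if_pos h1, if_neg h2]
    rw [he]
    have hpos : (0:Int) ≤ ((a.toNat - (a.toNat &&& (-b - 1).toNat) : Nat) : Int) := by positivity
    simp only [itb, if_pos hpos, if_pos h1, if_neg h2, Int.toNat_natCast]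
    rw [pv_sub_and, Nat.testBit_ldiff]
  · have he : PySem.Int.band a b = ((b.toNat - (b.toNat &&& (-a - 1).toNat) : Nat) : Int) := by
      simp only [PySem.Int.band, if_neg h1, if_pos h2]
    rw [he]
    have hpos : (0:Int) ≤ ((b.toNat - (b.toNat &&& (-a - 1).toNat) : Nat) : Int) := by positivity
    simp only [itb, if_pos hpos, if_neg h1, if_pos h2, Int.toNat_natCast]
    rw [pv_sub_and, Nat.testBit_ldiff]
    cases (b.toNat.testBit i) <;> cases ((-a - 1).toNat.testBit i) <;> simp
  · have he : PySem.Int.band a b = -((((-a - 1).toNat ||| (-b - 1).toNat : Nat)) : Int) - 1 := by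
      simp only [PySem.Int.band, if_neg h1, if_neg h2]
    rw [he]
    have hneg : ¬ (0:Int) ≤ -((((-a - 1).toNat ||| (-b - 1).toNat : Nat)) : Int) - 1 := by
      have : (0:Int) ≤ ((((-a - 1).toNat ||| (-b - 1).toNat : Nat)) : Int) := by positivity
      omega
    simp only [itb, if_neg hneg, if_neg h1, if_neg h2]
    have harg : (-(-((((-a - 1).toNat ||| (-b - 1).toNat : Nat)) : Int) - 1) - 1).toNat
        = (-a - 1).toNat ||| (-b - 1).toNat := by omega
    rw [harg, Nat.testBit_lor]
    cases ((-a - 1).toNat.testBit i) <;> cases ((-b - 1).toNat.testBit i) <;> simp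

theorem itb_not (a : Int) (i : Nat) : itb (Int.not a) i = !(itb a i) := by
  cases a with
  | ofNat n =>
      have h1 : (0:Int) ≤ Int.ofNat n := Int.ofNat_nonneg n
      have h2 : ¬ (0:Int) ≤ Int.negSucc n := by omega
      have h3 : (-(Int.negSucc n) - 1).toNat = n := by omega
      simp [Int.not, itb, h1, h2, h3]
  | negSucc n =>
      have h1 : (0:Int) ≤ Int.ofNat n := Int.ofNat_nonneg n
      have h2 : ¬ (0:Int) ≤ Int.negSucc n := by omega
      have h3 : (-(Int.negSucc n) - 1).toNat = n := by omega
      simp [Int.not, itb, h1, h2, h3]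

theorem pv_testBit_add (x y : Nat) : x.testBit (x + y) = false :=
  Nat.testBit_eq_false_of_lt
    (lt_of_lt_of_le Nat.lt_two_pow_self (Nat.pow_le_pow_right (by norm_num) (Nat.le_add_right x y)))

theorem itb_inj {a b : Int} (h : ∀ i, itb a i = itb b i) : a = b := by
  by_cases h1 : 0 ≤ a <;> by_cases h2 : 0 ≤ b
  · have : a.toNat = b.toNat := by
      apply Nat.eq_of_testBit_eq
      intro i
      have := h i
      simpa [itb, h1, h2] using this
    omega
  · exfalso
    have := h (a.toNat + (-b - 1).toNat)
    rw [itb, itb, if_pos h1, if_neg h2, pv_testBit_add] at this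
    rw [show a.toNat + (-b - 1).toNat = (-b - 1).toNat + a.toNat from Nat.add_comm _ _,
      pv_testBit_add] at this
    simp at this
  · exfalso
    have := h (b.toNat + (-a - 1).toNat)
    rw [itb, itb, if_neg h1, if_pos h2, pv_testBit_add] at this
    rw [show b.toNat + (-a - 1).toNat = (-a - 1).toNat + b.toNat from Nat.add_comm _ _,
      pv_testBit_add] at this
    simp at this
  · have : (-a - 1).toNat = (-b - 1).toNat := by
      apply Nat.eq_of_testBit_eq
      intro i
      have := h i
      rw [itb, itb, if_neg h1, if_neg h2] at this
      exact Bool.not_inj this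
    omega

theorem itb_shift (p i : Nat) : itb ((1 <<< p : Int)) i = decide (i = p) := by
  have h : (1 <<< p : Int) = ((1 <<< p : Nat) : Int) := by simp [Nat.shiftLeft_eq]
  rw [h, itb_natCast]
  simp [Nat.shiftLeft_eq, Nat.testBit_two_pow, eq_comm]

-- bitwise identity (I): associativity of or.
theorem bor_assoc' (v a b : Int) :
    PySem.Int.bor (PySem.Int.bor v a) b = PySem.Int.bor v (PySem.Int.bor a b) := by
  apply itb_inj; intro i; simp [itb_bor, Bool.or_assoc]

-- bitwise identity (II): a clear-then-or with disjoint masks commutes into one combined mask op.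
theorem clear_or_comm (v o s c : Int) (h : ∀ i, itb o i = true → itb s i = false) :
    PySem.Int.band (PySem.Int.bor (PySem.Int.band v (Int.not s)) o) (Int.not c)
      = PySem.Int.band (PySem.Int.bor v o) (Int.not (PySem.Int.bor s c)) := by
  apply itb_inj; intro i
  have hi := h i
  simp only [itb_band, itb_bor, itb_not]
  cases ho : itb o i <;> cases hs : itb s i <;> cases itb v i <;> cases itb c i <;>
    simp_all

-- closed-form aggregate mask of the scan for target character d, position p for the head.
def maskN (d : Char) : List Char → Nat → Nat
  | [], _ => 0
  | ch :: t, p => (if ch = d then 1 <<< p else 0) ||| maskN d t (p - 1)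

-- every '0'/'1' character sits at index ≤ p.
def ok (l : List Char) (p : Nat) : Prop :=
  ∀ j c, l[j]? = some c → (c = '0' ∨ c = '1') → j ≤ p

theorem ok_tail {ch : Char} {t : List Char} {p : Nat} (h : ok (ch :: t) p) :
    ok t (p - 1) := by
  intro j c hj hc
  have := h (j + 1) c (by simpa using hj) hc
  omega

theorem ok_zero_tail {ch : Char} {t : List Char} (h : ok (ch :: t) 0) :
    ∀ c ∈ t, ¬(c = '0' ∨ c = '1') := by
  intro c hm hc
  obtain ⟨j, hj, he⟩ := List.getElem_of_mem hm
  have : (ch :: t)[j + 1]? = some c := by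
    rw [List.getElem?_cons_succ]
    exact List.getElem?_eq_some_iff.mpr ⟨hj, he⟩
  have := h (j + 1) c this hc
  omega

-- a suffix with no '0'/'1' characters changes nothing.
theorem calcAux_noop (l : List Char) (bp v : Int)
    (h : ∀ c ∈ l, ¬(c = '0' ∨ c = '1')) : calcAux l bp v = v := by
  induction l generalizing bp with
  | nil => rfl
  | cons ch t ih =>
      have hc := h ch (by simp)
      have h1 : ch ≠ '1' := fun e => hc (Or.inr e)
      have h0 : ch ≠ '0' := fun e => hc (Or.inl e)
      simp [calcAux, h1, h0]
      exact ih _ (fun c hm => h c (by simp [hm]))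

theorem maskN_noop (d : Char) (hd : d = '1' ∨ d = '0') (l : List Char) (p : Nat)
    (h : ∀ c ∈ l, ¬(c = '0' ∨ c = '1')) : maskN d l p = 0 := by
  induction l generalizing p with
  | nil => rfl
  | cons ch t ih =>
      have hc := h ch (by simp)
      have hne : ch ≠ d := by
        rcases hd with e | e <;> subst e
        · exact fun e => hc (Or.inr e)
        · exact fun e => hc (Or.inl e)
      simp [maskN, hne, ih (p-1) (fun c hm => h c (by simp [hm]))]

theorem maskN_lt (d : Char) (l : List Char) (p : Nat) : maskN d l p < 2 ^ (p + 1) := by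
  induction l generalizing p with
  | nil => simp [maskN]
  | cons ch t ih =>
      have hhead : (if ch = d then 1 <<< p else 0) < 2 ^ (p + 1) := by
        split
        · rw [Nat.shiftLeft_eq, one_mul]
          exact Nat.pow_lt_pow_right (by norm_num) (Nat.lt_succ_self p)
        · positivity
      have htail : maskN d t (p - 1) < 2 ^ (p + 1) := by
        calc maskN d t (p - 1) < 2 ^ (p - 1 + 1) := ih (p - 1)
          _ ≤ 2 ^ (p + 1) := Nat.pow_le_pow_right (by norm_num) (by omega)
      exact Nat.or_lt_two_pow hhead htail

-- A computes the combined-mask closed form.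
theorem pv_not_zero : Int.not 0 = -1 := rfl

theorem pv_shift_cast (p : Nat) : (1 <<< p : Int) = ((1 <<< p : Nat) : Int) := by
  simp [Nat.shiftLeft_eq]

theorem pv_or_nat (a : Int) (m n : Nat) :
    PySem.Int.bor (PySem.Int.bor a ((m : Nat) : Int)) ((n : Nat) : Int)
      = PySem.Int.bor a ((m ||| n : Nat) : Int) := by
  rw [bor_assoc']; simp

theorem A_char : ∀ (l : List Char) (p : Nat) (v : Int), ok l p →
    calcAux l (p : Int) v
      = PySem.Int.band (PySem.Int.bor v (maskN '1' l p : Nat)) (Int.not (maskN '0' l p : Nat)) := by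
  intro l
  induction l with
  | nil =>
      intro p v _
      simp [calcAux, maskN, PySem.Int.bor_zero, pv_not_zero, PySem.Int.band_neg_one]
  | cons ch t ih =>
      intro p v hok
      cases p with
      | zero =>
          have hnt := ok_zero_tail hok
          have hor := maskN_noop '1' (Or.inl rfl) t 0 hnt
          have hclr := maskN_noop '0' (Or.inr rfl) t 0 hnt
          show calcAux t ((0:Int) - 1) _ = _
          rw [calcAux_noop t _ _ hnt]
          by_cases hc1 : ch = '1'
          · simp [hc1, maskN, hor, hclr, pv_not_zero, PySem.Int.band_neg_one,
              pv_shift_cast 0]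
          · by_cases hc0 : ch = '0'
            · simp [hc0, hc1, maskN, hor, hclr, PySem.Int.bor_zero, pv_shift_cast 0]
            · simp [hc0, hc1, maskN, hor, hclr, PySem.Int.bor_zero, pv_not_zero,
                PySem.Int.band_neg_one, calcAux]
      | succ q =>
          have hokt : ok t q := by simpa using ok_tail hok
          have harith : (((q+1 : Nat) : Int)) - 1 = (q : Int) := by push_cast; ring
          have htn : (((q+1 : Nat) : Int)).toNat = q + 1 := by omega
          show calcAux t ((((q+1 : Nat) : Int)) - 1) _ = _
          rw [harith]
          by_cases hc1 : ch = '1'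
          · rw [show (if ch = '1' then PySem.Int.bor v (1 <<< (((q+1 : Nat) : Int)).toNat)
                else if ch = '0' then PySem.Int.band v (Int.not (1 <<< (((q+1 : Nat) : Int)).toNat))
                else v) = PySem.Int.bor v ((1 <<< (q+1) : Nat) : Int) by
                simp [hc1, htn, pv_shift_cast]]
            rw [ih q _ hokt]
            have : PySem.Int.bor (PySem.Int.bor v ((1 <<< (q+1) : Nat) : Int)) ((maskN '1' t q : Nat) : Int)
                = PySem.Int.bor v (((1 <<< (q+1)) ||| maskN '1' t q : Nat) : Int) := pv_or_nat v _ _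
            rw [this]
            simp [maskN, hc1]
          · by_cases hc0 : ch = '0'
            · rw [show (if ch = '1' then PySem.Int.bor v (1 <<< (((q+1 : Nat) : Int)).toNat)
                  else if ch = '0' then PySem.Int.band v (Int.not (1 <<< (((q+1 : Nat) : Int)).toNat))
                  else v) = PySem.Int.band v (Int.not ((1 <<< (q+1) : Nat) : Int)) by
                  simp [hc0, hc1, htn, pv_shift_cast]]
              rw [ih q _ hokt]
              have hdisj : ∀ i, itb ((maskN '1' t q : Nat) : Int) i = true →
                  itb ((1 <<< (q+1) : Nat) : Int) i = false := by
                intro i hi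
                rw [← pv_shift_cast, itb_shift]
                by_contra hne
                simp at hne
                subst hne
                rw [itb_natCast, Nat.testBit_eq_false_of_lt (maskN_lt '1' t q)] at hi
                exact Bool.false_ne_true hi
              have := clear_or_comm v ((maskN '1' t q : Nat) : Int) ((1 <<< (q+1) : Nat) : Int)
                ((maskN '0' t q : Nat) : Int) hdisj
              rw [this]
              have hb : PySem.Int.bor ((1 <<< (q+1) : Nat) : Int) ((maskN '0' t q : Nat) : Int)
                  = (((1 <<< (q+1)) ||| maskN '0' t q : Nat) : Int) := PySem.Int.bor_natCast _ _
              rw [hb]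
              simp [maskN, hc0, hc1]
            · rw [show (if ch = '1' then PySem.Int.bor v (1 <<< (((q+1 : Nat) : Int)).toNat)
                  else if ch = '0' then PySem.Int.band v (Int.not (1 <<< (((q+1 : Nat) : Int)).toNat))
                  else v) = v by simp [hc0, hc1]]
              rw [ih q _ hokt]
              simp [maskN, hc0, hc1]

-- B-side: the Horner fold with accumulator a.
theorem binfold (l : List Char) (a : Nat) :
    l.foldl (fun a c => 2 * a + (if c = '1' then 1 else 0)) a
      = a * 2 ^ l.length + binParse l := by
  induction l generalizing a with
  | nil => simp [binParse]
  | cons c t ih =>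
      simp only [List.foldl_cons, List.length_cons, binParse] at *
      rw [ih, ih (2 * 0 + _)]
      ring

-- disjoint or is addition.
theorem pv_pow_add_or (p r : Nat) (h : r < 2 ^ p) : 2 ^ p ||| r = 2 ^ p + r := by
  apply Nat.eq_of_testBit_eq
  intro i
  rw [Nat.testBit_or]
  rcases lt_trichotomy i p with hi | hi | hi
  · rw [Nat.testBit_two_pow_add_gt hi, Nat.testBit_two_pow_of_ne (by omega)]
    simp
  · subst hi
    rw [Nat.testBit_two_pow_add_eq, Nat.testBit_two_pow_self,
      Nat.testBit_eq_false_of_lt h]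
    simp
  · have hle : 2 ^ (p + 1) ≤ 2 ^ i := Nat.pow_le_pow_right (by norm_num) (by omega)
    have hp : 2 ^ (p + 1) = 2 ^ p * 2 := Nat.pow_succ 2 p
    have h1 : r.testBit i = false := Nat.testBit_eq_false_of_lt (by omega)
    have h2 : (2 ^ p + r).testBit i = false := Nat.testBit_eq_false_of_lt (by omega)
    rw [h1, h2, Nat.testBit_two_pow_of_ne (by omega)]
    simp

-- B's slice-translate-parse-shift computes the same aggregate mask.
theorem B_char (d : Char) : ∀ (m : List Char) (p : Nat), m.length ≤ p + 1 →
    (binParse (m.map (fun c => if c = d then '1' else '0'))) <<< (p + 1 - m.length)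
      = maskN d m p := by
  intro m
  induction m with
  | nil =>
      intro p _
      simp [binParse, maskN]
  | cons c t ih =>
      intro p hlen
      have hlt : t.length ≤ p := by simpa using hlen
      have hbit : (if (if c = d then '1' else '0') = '1' then 1 else 0)
          = (if c = d then 1 else 0 : Nat) := by
        by_cases hc : c = d <;> simp [hc]
      have hhead : binParse ((c :: t).map (fun c => if c = d then '1' else '0'))
          = (if c = d then 1 else 0) * 2 ^ t.length
            + binParse (t.map (fun c => if c = d then '1' else '0')) := by
        simp only [List.map_cons, binParse, List.foldl_cons]
        rw [binfold]
        simp [binParse, hbit]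
      rw [hhead]
      cases p with
      | zero =>
          have ht : t = [] := List.length_eq_zero_iff.mp (Nat.le_zero.mp hlt)
          subst ht
          by_cases hc : c = d <;> simp [hc, maskN, binParse]
      | succ q =>
          have hql : t.length ≤ q + 1 := hlt
          have ihq := ih q hql
          rw [Nat.shiftLeft_eq] at ihq ⊢
          simp only [List.length_cons]
          rw [show q + 1 + 1 - (t.length + 1) = q + 1 - t.length by omega,
            Nat.add_mul, mul_assoc, ← pow_add,
            show t.length + (q + 1 - t.length) = q + 1 by omega, ihq]
          show _ = maskN d (c :: t) (q + 1)
          rw [show maskN d (c :: t) (q + 1)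
              = (if c = d then 1 <<< (q + 1) else 0) ||| maskN d t (q + 1 - 1) from rfl,
            show q + 1 - 1 = q by omega]
          by_cases hc : c = d
          · rw [if_pos hc, if_pos hc, one_mul, Nat.shiftLeft_eq, one_mul,
              pv_pow_add_or (q + 1) _ (maskN_lt d t q)]
          · rw [if_neg hc, if_neg hc, zero_mul, Nat.zero_add, Nat.zero_or]

theorem pre_ok (mask : String) (val : Int) (h : Pre_calc_py mask val) : ok mask.toList 35 := by
  intro j c hj hc
  by_contra hgt
  push_neg at hgt
  have hd : (mask.toList.drop 36)[j - 36]? = some c := by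
    rw [List.getElem?_drop]
    rwa [show 36 + (j - 36) = j by omega]
  have hm : c ∈ mask.toList.drop 36 := by
    obtain ⟨h1, h2⟩ := List.getElem?_eq_some_iff.mp hd
    exact h2 ▸ List.getElem_mem h1
  have hall := List.all_eq_true.mp h c hm
  rcases hc with hc | hc <;> simp [hc] at hall

theorem maskN_take (d : Char) (hd : d = '1' ∨ d = '0') :
    ∀ (l : List Char) (p : Nat), ok l p → maskN d l p = maskN d (l.take (p + 1)) p := by
  intro l
  induction l with
  | nil => intro p _; simp
  | cons c t ih =>
      intro p hok
      cases p with
      | zero =>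
          have hnt := ok_zero_tail hok
          simp [maskN, maskN_noop d hd t 0 hnt]
      | succ q =>
          have hokt : ok t q := by simpa using ok_tail hok
          simp only [List.take_succ_cons, maskN]
          rw [show (q + 1 - 1) = q by omega, ih q hokt]

-- ===== VERDICT (by name: the statement is the Claim_ definition above) =====
theorem calc_py_spec : Claim_equal_calc_py := by
  intro mask val _ hpre
  have hok : ok mask.toList 35 := pre_ok mask val hpre
  have hlen : (mask.toList.take 36).length ≤ 36 := by
    simpa using List.length_take_le 36 mask.toList
  have hA := A_char mask.toList 35 val hok
  have hB1 := B_char '1' (mask.toList.take 36) 35 hlen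
  have hB0 := B_char '0' (mask.toList.take 36) 35 hlen
  norm_num at hA
  unfold Spec_calc_py calc_py calc_py_alt
  rw [hA]
  simp only []
  rw [show (36 : Nat) - (mask.toList.take 36).length = 35 + 1 - (mask.toList.take 36).length by norm_num,
    hB1, hB0, ← maskN_take '1' (Or.inl rfl) mask.toList 35 hok,
    ← maskN_take '0' (Or.inr rfl) mask.toList 35 hok]
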